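-- pv_equiv track=rewrite | github.com/Tomyb182/CS50P | WEEK 5 - Unit Tests/test_plates/plates.py | fourth
-- ===== SOURCE A (Python) =====
-- def fourth(x):
--     numbers = '0123456789'
--     found_non_number = False
--
--     for char in reversed(x):
--         if char not in numbers:
--             found_non_number = True
--
--         elif found_non_number:
--             return False
--     return True
-- ===== SOURCE B (Python) =====
-- import re
--
-- def fourth(x):
--     return bool(re.fullmatch(r'[^0-9]*[0-9]*', x))
-- ===== Notes on version B (the rewrite author's own statement) =====
-- stated objective: idiomatic
-- what changed: Replaces the manual right-to-left flag scan with a single regex fullmatch of the valid shape [^0-9]*[0-9]* (any non-digits followed by trailing ASCII digits).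
import Mathlib
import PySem

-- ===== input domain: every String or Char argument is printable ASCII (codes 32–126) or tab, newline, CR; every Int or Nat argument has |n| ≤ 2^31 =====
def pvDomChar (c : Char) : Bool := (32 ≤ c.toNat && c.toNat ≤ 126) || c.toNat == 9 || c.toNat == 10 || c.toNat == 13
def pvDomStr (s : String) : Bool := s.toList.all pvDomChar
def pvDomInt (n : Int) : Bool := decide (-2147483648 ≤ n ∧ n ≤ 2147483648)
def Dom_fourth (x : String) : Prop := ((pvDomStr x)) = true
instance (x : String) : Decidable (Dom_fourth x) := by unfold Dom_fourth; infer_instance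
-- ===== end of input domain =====

-- B replaces A's right-to-left flag scan by a regex fullmatch of the valid shape
-- [^0-9]*[0-9]* (idiomatic; same behaviour, no speed claim).

-- membership in '0123456789' (A's 'char in numbers' test; exact for ASCII digits)
def pvIsDig (c : Char) : Bool := '0' ≤ c && c ≤ '9'

-- ===== PORT A =====
-- the for-loop over reversed(x) with the found_non_number flag and early return
def fourthLoop : List Char → Bool → Bool
  | [], _ => true
  | c :: rest, found =>
      if !pvIsDig c then fourthLoop rest true
      else if found then false
      else fourthLoop rest found

def fourth (x : String) : Bool := fourthLoop x.toList.reverse false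

-- ===== PORT B =====
-- re.fullmatch(r'[^0-9]*[0-9]*', x): the greedy leading [^0-9]* consumes the maximal
-- run of non-digits, and the whole string matches iff the remainder is all digits.
def fourth_alt (x : String) : Bool :=
  (x.toList.dropWhile (fun c => !pvIsDig c)).all pvIsDig

-- ===== PRECONDITION & SPEC =====
def Spec_fourth (x : String) (out : Bool) : Prop := out = fourth_alt x
instance (x : String) (out : Bool) : Decidable (Spec_fourth x out) := by unfold Spec_fourth; infer_instance

-- ===== CLAIM (what is proved, stated in full; the proofs are below) =====
def Claim_equal_fourth : Prop := ∀ (x : String), Dom_fourth x → Spec_fourth x (fourth x)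

-- ===== LEMMAS AND PROOFS =====

-- A's scan with found = true succeeds iff every remaining char is a non-digit
lemma fourthLoop_true (r : List Char) :
    fourthLoop r true = r.all (fun c => !pvIsDig c) := by
  induction r with
  | nil => rfl
  | cons c t ih =>
      by_cases h : pvIsDig c = true <;> simp [fourthLoop, h, ih]

-- A's scan succeeds iff the reversed string is digits* then non-digits*,
-- i.e. no digit strictly later than a non-digit (Pairwise characterisation)
lemma fourthLoop_false (r : List Char) :
    fourthLoop r false
      = decide (r.Pairwise (fun a b => pvIsDig b = true → pvIsDig a = true)) := by
  induction r with
  | nil => rfl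
  | cons c t ih =>
      by_cases h : pvIsDig c = true
      · simp [fourthLoop, h, ih, List.pairwise_cons]
      · rw [Bool.eq_iff_iff]
        simp only [fourthLoop, h, Bool.not_false, if_true, fourthLoop_true,
          List.all_eq_true, decide_eq_true_eq, List.pairwise_cons, Bool.not_eq_true']
        constructor
        · intro hall
          refine ⟨fun b hb hdb => absurd (hall b hb) (by simp [hdb]), ?_⟩
          exact List.pairwise_of_forall_mem_list
            (fun a _ b hb hdb => absurd (hall b hb) (by simp [hdb]))
        · rintro ⟨hc, -⟩ b hb
          by_cases hdb : pvIsDig b = true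
          · exact absurd (hc b hb hdb) (by simp)
          · simpa using hdb

-- B succeeds iff the string is non-digits* then digits* (Pairwise characterisation)
lemma alt_pairwise (l : List Char) :
    ((l.dropWhile (fun c => !pvIsDig c)).all pvIsDig)
      = decide (l.Pairwise (fun a b => pvIsDig a = true → pvIsDig b = true)) := by
  induction l with
  | nil => rfl
  | cons c t ih =>
      by_cases h : pvIsDig c = true
      · rw [Bool.eq_iff_iff]
        simp only [List.dropWhile_cons, h, Bool.not_true, Bool.false_eq_true, if_false,
          List.all_cons, Bool.true_and, List.all_eq_true,
          decide_eq_true_eq, List.pairwise_cons]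
        constructor
        · intro hall
          exact ⟨fun b hb _ => hall b hb,
            List.pairwise_of_forall_mem_list (fun a _ b hb _ => hall b hb)⟩
        · rintro ⟨hc, -⟩ b hb
          exact hc b hb trivial
      · simp only [List.dropWhile_cons, h, Bool.not_false, if_true, ih]
        rw [Bool.eq_iff_iff]
        simp only [decide_eq_true_eq, List.pairwise_cons]
        exact ⟨fun hp => ⟨fun b _ hdb => absurd hdb (fun _ => h hdb), hp⟩,
               fun hx => hx.2⟩

-- ===== VERDICT (by name: the statement is the Claim_ definition above) =====
theorem fourth_spec : Claim_equal_fourth := by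
  intro x _
  unfold Spec_fourth fourth fourth_alt
  rw [fourthLoop_false, alt_pairwise, decide_eq_decide, List.pairwise_reverse]
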